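-- pv_equiv track=rewrite | github.com/ParJai/hackBCA | Games/Anagrams/anagrams.py | finalCombos
-- ===== SOURCE A (Python) =====
-- import itertools
--
-- def finalCombos(aList):
--
--     combos = []
--     finalCombos = []
--     permutations = list(itertools.permutations(aList))
--     for permutation in permutations:
--         word = ""
--         for char in permutation:
--             word += char
--         combos.append(word)
--         combos.append(word[:5])
--         combos.append(word[:4])
--         combos.append(word[:3])
--     finalCombos = list(set(combos))
--     return finalCombos
-- ===== SOURCE B (Python) =====
-- def finalCombos(aList):
--     # DFS over element choices, building each word incrementally and collecting
--     # the word plus its 5/4/3-char prefixes into one set (no materialized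
--     # permutation tuples, no re-join per permutation).
--     result = set()
--
--     def go(remaining, word):
--         if not remaining:
--             result.add(word)
--             result.add(word[:5])
--             result.add(word[:4])
--             result.add(word[:3])
--         else:
--             for i in range(len(remaining)):
--                 go(remaining[:i] + remaining[i + 1:], word + remaining[i])
--
--     go(aList, "")
--     return list(result)
-- ===== Notes on version B (the rewrite author's own statement) =====
-- stated objective: alternative
-- what changed: Replaces 'materialize list(itertools.permutations), re-join each tuple into a word, append word and its 5/4/3-char prefixes to a list, dedupe at the end' by a recursive DFS over element choices that builds each word incrementally (sharing prefixes) and adds the word and its prefixes directly into one set.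
import Mathlib
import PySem

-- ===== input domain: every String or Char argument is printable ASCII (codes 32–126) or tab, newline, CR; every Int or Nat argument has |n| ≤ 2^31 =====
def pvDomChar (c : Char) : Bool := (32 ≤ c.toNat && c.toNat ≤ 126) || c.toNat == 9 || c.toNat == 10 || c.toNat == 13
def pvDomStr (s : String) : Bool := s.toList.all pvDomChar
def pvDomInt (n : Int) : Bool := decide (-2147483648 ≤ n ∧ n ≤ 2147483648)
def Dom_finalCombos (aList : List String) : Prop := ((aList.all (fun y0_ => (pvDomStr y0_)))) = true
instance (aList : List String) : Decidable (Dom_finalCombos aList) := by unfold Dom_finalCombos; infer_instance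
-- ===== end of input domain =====

-- B replaces 'materialize all permutation tuples, join each, slice prefixes, dedupe at the end'
-- by a DFS over element choices that extends the word incrementally and adds word + prefixes
-- to one set as each permutation completes (objective: alternative; same deduped result).

-- ===== PORT A =====
def finalCombos (aList : List String) : List String :=
  -- combos = []; for permutation in list(itertools.permutations(aList)): build word by +=,
  -- append word, word[:5], word[:4], word[:3]; return list(set(combos))
  let permutations := PySem.List.permutations aList aList.length
  let combos : List String := permutations.foldl
    (fun combos permutation =>
      let word := permutation.foldl (fun w c => w ++ c.toList) ([] : List Char)
      combos ++ [String.ofList word] ++ [String.ofList (word.take 5)]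
        ++ [String.ofList (word.take 4)] ++ [String.ofList (word.take 3)])
    []
  PySem.Set.ofList combos

-- ===== PORT B =====
-- go(remaining, word): at a leaf add word and its 5/4/3-char prefixes to the set,
-- else recurse on each remaining[:i]+remaining[i+1:] with word + remaining[i].
-- The fuel argument (= remaining.length at every call) only makes the recursion structural.
def finalCombosGo : Nat → List String → List Char → PySem.Set String → PySem.Set String
  | _, [], word, acc =>
      (((acc.add (String.ofList word)).add (String.ofList (word.take 5))).add
        (String.ofList (word.take 4))).add (String.ofList (word.take 3))
  | 0, _ :: _, _, acc => acc
  | n + 1, remaining, word, acc =>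
      (List.range remaining.length).foldl
        (fun acc i =>
          finalCombosGo n (remaining.eraseIdx i)
            (word ++ (remaining.getD i "").toList) acc)
        acc

def finalCombos_alt (aList : List String) : List String :=
  finalCombosGo aList.length aList [] PySem.Set.empty

-- ===== PRECONDITION & SPEC =====
def Spec_finalCombos (aList : List String) (out : List String) : Prop := out = finalCombos_alt aList
instance (aList : List String) (out : List String) : Decidable (Spec_finalCombos aList out) := by unfold Spec_finalCombos; infer_instance

-- ===== CLAIM (what is proved, stated in full; the proofs are below) =====
def Claim_equal_finalCombos : Prop := ∀ (aList : List String), Dom_finalCombos aList → Spec_finalCombos aList (finalCombos aList)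

-- ===== LEMMAS AND PROOFS =====

-- characters of the word a permutation tuple joins to
def pvWordChars (p : List String) : List Char := (p.map String.toList).flatten

-- the four strings one permutation contributes to combos
def pvGCombos (w : List Char) : List String :=
  [String.ofList w, String.ofList (w.take 5), String.ofList (w.take 4), String.ofList (w.take 3)]

theorem pvGo_eq (n : Nat) : ∀ (remaining : List String), remaining.length = n →
    ∀ (word : List Char) (acc : PySem.Set String),
    finalCombosGo n remaining word acc
      = (PySem.List.permutations remaining n).foldl
          (fun acc p => (pvGCombos (word ++ pvWordChars p)).foldl PySem.Set.add acc) acc := by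
  induction n with
  | zero =>
    intro remaining h word acc
    match remaining, h with
    | [], _ =>
      simp [finalCombosGo, PySem.List.permutations, pvGCombos, pvWordChars, List.foldl]
  | succ n ih =>
    intro remaining h word acc
    match remaining, h with
    | x :: xs, h =>
      show (List.range (x :: xs).length).foldl _ acc = _
      rw [PySem.List.permutations, List.foldl_flatMap]
      apply PySem.List.foldl_congr_mem
      intro acc i hi
      have hlt : i < (x :: xs).length := List.mem_range.mp hi
      have hget : (x :: xs)[i]? = some ((x :: xs).getD i "") := by
        simp [List.getD_eq_getElem?_getD, List.getElem?_eq_getElem hlt]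
      have hlen : ((x :: xs).eraseIdx i).length = n := by
        rw [List.length_eraseIdx]; rw [if_pos hlt]; omega
      rw [ih ((x :: xs).eraseIdx i) hlen _ acc]
      rw [hget]
      simp only [List.foldl_map]
      apply PySem.List.foldl_congr_mem
      intro acc' p _
      simp [pvWordChars, pvGCombos, List.append_assoc]

-- ===== VERDICT (by name: the statement is the Claim_ definition above) =====
theorem finalCombos_spec : Claim_equal_finalCombos := by
  intro aList _
  show finalCombos aList = finalCombos_alt aList
  unfold finalCombos finalCombos_alt
  rw [pvGo_eq aList.length aList rfl [] PySem.Set.empty]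
  have hcombos :
      (PySem.List.permutations aList aList.length).foldl
        (fun combos permutation =>
          let word := permutation.foldl (fun w c => w ++ c.toList) ([] : List Char)
          combos ++ [String.ofList word] ++ [String.ofList (word.take 5)]
            ++ [String.ofList (word.take 4)] ++ [String.ofList (word.take 3)])
        ([] : List String)
      = (PySem.List.permutations aList aList.length).flatMap
          (fun p => pvGCombos (pvWordChars p)) := by
    have := PySem.List.foldl_append_eq_flatMap
      (fun p : List String => pvGCombos (pvWordChars p))
      (PySem.List.permutations aList aList.length) ([] : List String)
    rw [List.nil_append] at this
    rw [← this]
    apply PySem.List.foldl_congr_mem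
    intro acc p _
    simp [pvGCombos, pvWordChars, List.append_assoc]
  simp only [hcombos]
  show List.foldl PySem.Set.add PySem.Set.empty _ = _
  rw [List.foldl_flatMap]
  apply PySem.List.foldl_congr_mem
  intro acc p _
  simp
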